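-- pv_equiv track=rewrite | github.com/rafaeltpaulino/MOOC2024 | part04/morestringsandlists.py | get_grades
-- ===== SOURCE A (Python) =====
-- def get_grades(studentsPoints : list[int], studentSituation : list[int]) -> list[int]:
--     grades = [0, 0, 0, 0, 0, 0]
--
--     for i in range(len(studentsPoints)):
--         if studentSituation[i] != 0:
--             if studentsPoints[i] < 15:
--                 grades[0] += 1
--             elif studentsPoints[i] < 18:
--                 grades[1] += 1
--             elif studentsPoints[i] < 21:
--                 grades[2] += 1
--             elif studentsPoints[i] < 24:
--                 grades[3] += 1
--             elif studentsPoints[i] < 28: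
--                 grades[4] += 1
--             elif studentsPoints[i] < 31:
--                 grades[5] += 1
--         else:
--             grades[0] += 1
--
--     return grades
-- ===== SOURCE B (Python) =====
-- _THRESHOLDS = [15, 18, 21, 24, 28, 31]
--
--
-- def get_grades(studentsPoints: list[int], studentSituation: list[int]) -> list[int]:
--     pairs = list(zip(studentsPoints, studentSituation))
--     zeros = sum(1 for _, s in pairs if s == 0)
--     active = sorted(p for p, s in pairs if s != 0)
--     grades = [0, 0, 0, 0, 0, 0]
--     i = 0
--     for k, t in enumerate(_THRESHOLDS):
--         while i < len(active) and active[i] < t: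
--             grades[k] += 1
--             i += 1
--     grades[0] += zeros
--     return grades
-- ===== Notes on version B (the rewrite author's own statement) =====
-- stated objective: alternative
-- what changed: Instead of bucketing each student through the if/elif ladder, B sorts the active scores once and then does a single merge scan against the sorted threshold table, consuming each run of scores below the next threshold; zero-situation students are counted separately into bucket 0 and scores >= 31 are simply left unconsumed.
import Mathlib
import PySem

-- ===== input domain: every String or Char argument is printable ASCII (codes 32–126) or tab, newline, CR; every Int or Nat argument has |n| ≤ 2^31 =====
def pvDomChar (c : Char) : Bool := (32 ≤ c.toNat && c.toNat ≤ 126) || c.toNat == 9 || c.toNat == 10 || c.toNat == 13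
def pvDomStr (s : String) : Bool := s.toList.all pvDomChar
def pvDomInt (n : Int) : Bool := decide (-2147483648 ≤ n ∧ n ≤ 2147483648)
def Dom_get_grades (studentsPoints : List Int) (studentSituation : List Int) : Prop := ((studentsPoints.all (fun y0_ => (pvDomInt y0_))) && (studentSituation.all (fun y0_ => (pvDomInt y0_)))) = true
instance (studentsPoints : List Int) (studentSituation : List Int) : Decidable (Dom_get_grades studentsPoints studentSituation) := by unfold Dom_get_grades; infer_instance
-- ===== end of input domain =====

-- B replaces A's per-student if/elif bucketing with sort-then-merge-scan: sort the active
-- scores once, then one scan over the sorted threshold table consumes each run of scores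
-- below the next threshold; same result, different algorithm (alternative, not faster).


-- ===== PORT A =====
-- grades[k] += 1
def pvIncrA (g : List Int) (k : Int) : List Int :=
  PySem.List.pySetD g k (PySem.List.pyGetD g k 0 + 1)

-- A's loop body for index i (the if/elif ladder)
def pvStepA (pts sit : List Int) (g : List Int) (i : Int) : List Int :=
  if PySem.List.pyGetD sit i 0 ≠ 0 then
    let p := PySem.List.pyGetD pts i 0
    if p < 15 then pvIncrA g 0
    else if p < 18 then pvIncrA g 1
    else if p < 21 then pvIncrA g 2
    else if p < 24 then pvIncrA g 3
    else if p < 28 then pvIncrA g 4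
    else if p < 31 then pvIncrA g 5
    else g
  else pvIncrA g 0

def get_grades (studentsPoints : List Int) (studentSituation : List Int) : List Int :=
  (PySem.List.pyRange 0 (studentsPoints.length : Int) 1).foldl
    (pvStepA studentsPoints studentSituation) [0, 0, 0, 0, 0, 0]

-- ===== PORT B =====
def pvThresholds : List Int := [15, 18, 21, 24, 28, 31]

-- the inner while loop: consume the leading run of scores < t; returns (consumed count, rest)
def pvTakeLt (t : Int) : List Int → Int × List Int
  | [] => (0, [])
  | x :: xs => if x < t then let r := pvTakeLt t xs; (r.1 + 1, r.2) else (0, x :: xs)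

-- the for loop over the threshold table: grades[k] = count consumed at threshold k
def pvScan : List Int → List Int → List Int
  | [], _ => []
  | t :: ts, xs => let r := pvTakeLt t xs; r.1 :: pvScan ts r.2

def get_grades_alt (studentsPoints : List Int) (studentSituation : List Int) : List Int :=
  let pairs := studentsPoints.zip studentSituation
  let zeros : Int := ((pairs.filter (fun ps => ps.2 == 0)).length : Int)
  let active := PySem.List.sorted ((pairs.filter (fun ps => ps.2 != 0)).map Prod.fst)
    (fun x => x) false
  match pvScan pvThresholds active with
  | g0 :: rest => (g0 + zeros) :: rest
  | [] => []

-- ===== PRECONDITION & SPEC =====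
-- Pre_ excludes exactly the inputs where A raises IndexError: studentSituation shorter
-- than studentsPoints (A indexes studentSituation[i] for every i < len(studentsPoints)).
def Pre_get_grades (studentsPoints : List Int) (studentSituation : List Int) : Prop :=
  studentsPoints.length ≤ studentSituation.length
instance (studentsPoints : List Int) (studentSituation : List Int) : Decidable (Pre_get_grades studentsPoints studentSituation) := by unfold Pre_get_grades; infer_instance

def pvWitness_get_grades : List Int × List Int := ([10, 16, 35, 20], [1, 1, 1, 0])

def Spec_get_grades (studentsPoints : List Int) (studentSituation : List Int) (out : List Int) : Prop := out = get_grades_alt studentsPoints studentSituation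
instance (studentsPoints : List Int) (studentSituation : List Int) (out : List Int) : Decidable (Spec_get_grades studentsPoints studentSituation out) := by unfold Spec_get_grades; infer_instance

-- ===== CLAIM =====
def Claim_equal_get_grades : Prop := ∀ (studentsPoints : List Int) (studentSituation : List Int), Dom_get_grades studentsPoints studentSituation → Pre_get_grades studentsPoints studentSituation → Spec_get_grades studentsPoints studentSituation (get_grades studentsPoints studentSituation)

-- ===== LEMMAS AND PROOFS =====

-- A's loop body restated on a (points, situation) pair
def pvStepPair (g : List Int) (ps : Int × Int) : List Int :=
  if ps.2 ≠ 0 then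
    if ps.1 < 15 then pvIncrA g 0
    else if ps.1 < 18 then pvIncrA g 1
    else if ps.1 < 21 then pvIncrA g 2
    else if ps.1 < 24 then pvIncrA g 3
    else if ps.1 < 28 then pvIncrA g 4
    else if ps.1 < 31 then pvIncrA g 5
    else g
  else pvIncrA g 0

-- bucket membership predicates on pairs
def pvQ0 (ps : Int × Int) : Bool := ps.2 == 0 || decide (ps.1 < 15)
def pvQ (lo hi : Int) (ps : Int × Int) : Bool := ps.2 != 0 && decide (lo ≤ ps.1) && decide (ps.1 < hi)

lemma pvStepA_shift (p s : Int) (pts sit : List Int) (g : List Int) (k : Nat) :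
    pvStepA (p :: pts) (s :: sit) g ((k : Int) + 1) = pvStepA pts sit g (k : Int) := by
  have h1 : ((k : Int) + 1) = ((k + 1 : Nat) : Int) := by push_cast; ring
  simp only [pvStepA, h1, PySem.List.pyGetD_natCast, List.getD_cons_succ]

-- A's indexed fold equals the fold of pvStepPair over the zipped pairs
lemma pv_main (pts : List Int) : ∀ (sit : List Int) (g : List Int),
    pts.length ≤ sit.length →
    (List.range pts.length).foldl (fun g (k : Nat) => pvStepA pts sit g (k : Int)) g
      = (pts.zip sit).foldl pvStepPair g := by
  induction pts with
  | nil => intro sit g _; simp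
  | cons p pts ih =>
    intro sit g hlen
    cases sit with
    | nil => simp at hlen
    | cons s sit =>
      simp only [List.length_cons] at hlen ⊢
      rw [List.range_succ_eq_map, List.foldl_cons, List.foldl_map, List.zip_cons_cons,
        List.foldl_cons]
      have h0 : pvStepA (p :: pts) (s :: sit) g ((0 : Nat) : Int) = pvStepPair g (p, s) := by
        simp [pvStepA, pvStepPair, PySem.List.pyGetD_zero_cons]
      rw [h0]
      have hfun : (fun g (k : Nat) => pvStepA (p :: pts) (s :: sit) g ((k : Nat) + 1 : Int))
          = fun g (k : Nat) => pvStepA pts sit g (k : Int) := by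
        funext g k; exact pvStepA_shift p s pts sit g k
      calc (List.range pts.length).foldl
            (fun g (k : Nat) => pvStepA (p :: pts) (s :: sit) g (((k + 1 : Nat) : Int))) (pvStepPair g (p, s))
          = (List.range pts.length).foldl (fun g (k : Nat) => pvStepA pts sit g (k : Int))
              (pvStepPair g (p, s)) := by
            simp only [Nat.cast_add, Nat.cast_one]
            rw [hfun]
        _ = (pts.zip sit).foldl pvStepPair (pvStepPair g (p, s)) := ih sit _ (by omega)

lemma pvIncr_eval (a b c d e f : Int) :
    pvIncrA [a,b,c,d,e,f] 0 = [a+1,b,c,d,e,f] ∧ pvIncrA [a,b,c,d,e,f] 1 = [a,b+1,c,d,e,f] ∧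
    pvIncrA [a,b,c,d,e,f] 2 = [a,b,c+1,d,e,f] ∧ pvIncrA [a,b,c,d,e,f] 3 = [a,b,c,d+1,e,f] ∧
    pvIncrA [a,b,c,d,e,f] 4 = [a,b,c,d,e+1,f] ∧ pvIncrA [a,b,c,d,e,f] 5 = [a,b,c,d,e,f+1] := by
  refine ⟨?_, ?_, ?_, ?_, ?_, ?_⟩ <;>
    simp [pvIncrA, PySem.List.pySetD_of_nonneg, PySem.List.pyGetD_of_nonneg]

lemma pv_countA : ∀ (l : List (Int × Int)) (a b c d e f : Int),
    l.foldl pvStepPair [a, b, c, d, e, f] =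
      [a + (l.countP pvQ0 : Int), b + (l.countP (pvQ 15 18) : Int),
       c + (l.countP (pvQ 18 21) : Int), d + (l.countP (pvQ 21 24) : Int),
       e + (l.countP (pvQ 24 28) : Int), f + (l.countP (pvQ 28 31) : Int)] := by
  intro l
  induction l with
  | nil => intro a b c d e f; simp
  | cons ps l ih =>
    intro a b c d e f
    obtain ⟨p, s⟩ := ps
    rw [List.foldl_cons]
    simp only [pvStepPair]
    split_ifs with h1 h2 h3 h4 h5 h6 h7
    all_goals try rw [(pvIncr_eval a b c d e f).1]
    all_goals try rw [(pvIncr_eval a b c d e f).2.1]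
    all_goals try rw [(pvIncr_eval a b c d e f).2.2.1]
    all_goals try rw [(pvIncr_eval a b c d e f).2.2.2.1]
    all_goals try rw [(pvIncr_eval a b c d e f).2.2.2.2.1]
    all_goals try rw [(pvIncr_eval a b c d e f).2.2.2.2.2]
    all_goals rw [ih]
    all_goals simp [List.countP_cons, pvQ0, pvQ, h1, *]
    all_goals push_cast
    all_goals omega
lemma pvTakeLt_sorted (t : Int) : ∀ (xs : List Int), xs.Pairwise (· ≤ ·) →
    pvTakeLt t xs = ((xs.countP (fun x => decide (x < t)) : Int),
      xs.filter (fun x => !decide (x < t))) := by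
  intro xs
  induction xs with
  | nil => intro _; simp [pvTakeLt]
  | cons x xs ih =>
    intro hp
    rw [List.pairwise_cons] at hp
    by_cases hx : x < t
    · simp [pvTakeLt, hx, ih hp.2, List.countP_cons]
    · have hall : ∀ y ∈ xs, ¬ y < t := fun y hy => by have := hp.1 y hy; omega
      simp [pvTakeLt, hx, List.countP_cons]
      constructor
      · have h0 : xs.countP (fun x => decide (x < t)) = 0 :=
          List.countP_eq_zero.mpr (fun a ha => by have := hall a ha; simp; omega)
        simp [h0]
      · exact (List.filter_eq_self.mpr (fun a ha => by have := hall a ha; simp; omega)).symm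

lemma pvFilter_pairwise {xs : List Int} (h : xs.Pairwise (· ≤ ·)) (p : Int → Bool) :
    (xs.filter p).Pairwise (· ≤ ·) := h.sublist List.filter_sublist

lemma pvScan_eval (xs : List Int) (h : xs.Pairwise (· ≤ ·)) :
    pvScan pvThresholds xs =
      [(xs.countP (fun x => decide (x < 15)) : Int),
       (xs.countP (fun x => decide (15 ≤ x) && decide (x < 18)) : Int),
       (xs.countP (fun x => decide (18 ≤ x) && decide (x < 21)) : Int),
       (xs.countP (fun x => decide (21 ≤ x) && decide (x < 24)) : Int),
       (xs.countP (fun x => decide (24 ≤ x) && decide (x < 28)) : Int),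
       (xs.countP (fun x => decide (28 ≤ x) && decide (x < 31)) : Int)] := by
  have hc : ∀ (ys : List Int) (p q : Int → Bool), (∀ a, p a = q a) → ys.countP p = ys.countP q :=
    fun ys p q hpq => List.countP_congr (fun a _ => by rw [hpq a])
  simp only [pvThresholds, pvScan]
  rw [pvTakeLt_sorted 15 xs h]
  rw [pvTakeLt_sorted 18 _ (pvFilter_pairwise h _)]
  rw [pvTakeLt_sorted 21 _ (pvFilter_pairwise (pvFilter_pairwise h _) _)]
  rw [pvTakeLt_sorted 24 _ (pvFilter_pairwise (pvFilter_pairwise (pvFilter_pairwise h _) _) _)]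
  rw [pvTakeLt_sorted 28 _ (pvFilter_pairwise (pvFilter_pairwise (pvFilter_pairwise (pvFilter_pairwise h _) _) _) _)]
  rw [pvTakeLt_sorted 31 _ (pvFilter_pairwise (pvFilter_pairwise (pvFilter_pairwise (pvFilter_pairwise (pvFilter_pairwise h _) _) _) _) _)]
  simp only [List.countP_filter, List.cons.injEq, and_true]
  refine ⟨trivial, ?_, ?_, ?_, ?_, ?_⟩ <;>
    · refine congrArg _ (hc xs _ _ ?_)
      intro a
      by_cases h15 : a < 15 <;> by_cases h18 : a < 18 <;> by_cases h21 : a < 21 <;>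
        by_cases h24 : a < 24 <;> by_cases h28 : a < 28 <;> by_cases h31 : a < 31 <;>
        simp [h15, h18, h21, h24, h28, h31] <;> omega
lemma pv_split0 : ∀ l : List (Int × Int),
    l.countP pvQ0 = l.countP (fun ps => ps.2 == 0)
      + l.countP (fun ps => ps.2 != 0 && decide (ps.1 < 15)) := by
  intro l
  induction l with
  | nil => simp
  | cons ps l ih =>
    by_cases hs : ps.2 = 0 <;> by_cases hp : ps.1 < 15 <;>
      simp [List.countP_cons, pvQ0, hs, hp, ih] <;> omega
lemma pv_altB (pts sit : List Int) :
    get_grades_alt pts sit =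
      [((pts.zip sit).countP (fun ps => ps.2 != 0 && decide (ps.1 < 15)) : Int)
         + ((pts.zip sit).countP (fun ps => ps.2 == 0) : Int),
       ((pts.zip sit).countP (pvQ 15 18) : Int), ((pts.zip sit).countP (pvQ 18 21) : Int),
       ((pts.zip sit).countP (pvQ 21 24) : Int), ((pts.zip sit).countP (pvQ 24 28) : Int),
       ((pts.zip sit).countP (pvQ 28 31) : Int)] := by
  have hc : ∀ (ys : List (Int × Int)) (p q : (Int × Int) → Bool), (∀ a, p a = q a) →
      ys.countP p = ys.countP q :=
    fun ys p q hpq => List.countP_congr (fun a _ => by rw [hpq a])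
  simp only [get_grades_alt]
  have hs : (PySem.List.sorted (((pts.zip sit).filter (fun ps => ps.2 != 0)).map Prod.fst)
      (fun x => x) false).Pairwise (· ≤ ·) := by
    simpa using PySem.List.sorted_pairwise
      (xs := ((pts.zip sit).filter (fun ps => ps.2 != 0)).map Prod.fst) (key := fun x => x)
  have hperm : (PySem.List.sorted (((pts.zip sit).filter (fun ps => ps.2 != 0)).map Prod.fst)
      (fun x => x) false).Perm (((pts.zip sit).filter (fun ps => ps.2 != 0)).map Prod.fst) :=
    PySem.List.sorted_perm _ _ _
  rw [pvScan_eval _ hs]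
  simp only [hperm.countP_eq, List.countP_map, List.countP_filter,
    ← List.countP_eq_length_filter, List.cons.injEq]
  have hb : ∀ (p q : (Int × Int) → Bool),
      (∀ a, p a = q a) → ∀ ys : List (Int × Int), (ys.countP p : Int) = (ys.countP q : Int) :=
    fun p q hpq ys => by rw [hc ys p q hpq]
  refine ⟨?_, ?_, ?_, ?_, ?_, ?_, trivial⟩
  · refine congrArg₂ (· + ·) (hb _ _ ?_ _) rfl
    intro a
    by_cases h2 : a.2 = 0 <;> by_cases h15 : a.1 < 15 <;> simp [Function.comp, h2, h15]
  all_goals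
  · refine hb _ _ ?_ _
    intro a
    by_cases h2 : a.2 = 0 <;> by_cases h15 : a.1 < 15 <;> by_cases h18 : a.1 < 18 <;>
      by_cases h21 : a.1 < 21 <;> by_cases h24 : a.1 < 24 <;> by_cases h28 : a.1 < 28 <;>
      by_cases h31 : a.1 < 31 <;> simp [Function.comp, pvQ, h2, h15, h18, h21, h24, h28, h31] <;> first | omega | exact Bool.and_comm ..

-- ===== VERDICT =====
theorem get_grades_spec : Claim_equal_get_grades := by
  intro pts sit _ hpre
  unfold Spec_get_grades get_grades
  rw [PySem.List.pyRange_one, List.foldl_map]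
  simp only [Int.sub_zero, Int.toNat_natCast, Int.zero_add]
  rw [pv_main pts sit _ hpre, pv_countA, pv_altB, pv_split0]
  simp only [List.cons.injEq]
  refine ⟨by push_cast; omega, by omega, by omega, by omega, by omega, by omega, trivial⟩
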